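-- pv_equiv track=rewrite | github.com/hellmrf/tester-rs | tests/files/lab10.py | follow_branch
-- ===== SOURCE A (Python) =====
-- from typing import Tuple
--
-- MAINLINE = 5
--
-- def follow_branch(matrix, j, i=MAINLINE, last_position: Tuple[int, int] = None) -> Tuple[int, int]:
--     """Follow a branch 'till the end and returns the end point.
--
--     Args:
--         matrix (list[list]): The matrix.
--         j (int): The column to start.
--         i (int): The row to start. (optional)
--         last_position Tuple[int, int]: The last position. (optional)
--
--     Returns:
--         tuple(int, int): The end point (i, j).
--     """
--     for Δi, Δj in [(-1, 0), (1, 0), (0, 1), (0, -1)]: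
--         i_ = i + Δi
--         j_ = j + Δj
--         if last_position is not None and (i_, j_) == last_position:
--             continue
--         if i_ < 0 or i_ >= len(matrix):
--             continue
--         if j_ < 0 or j_ >= len(matrix[0]):
--             continue
--         if matrix[i_][j_] == '+':
--             return follow_branch(matrix, j_, i_, (i, j))
--     return (i, j)
-- ===== SOURCE B (Python) =====
-- MAINLINE = 5
--
-- def follow_branch(matrix, j, i=MAINLINE, last_position=None):
--     """Iterative version: follow the branch of '+' cells with an explicit loop."""
--     cur = (i, j)
--     last = last_position
--     while True:
--         ci, cj = cur
--         nxt = None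
--         for di, dj in ((-1, 0), (1, 0), (0, 1), (0, -1)):
--             n = (ci + di, cj + dj)
--             if n == last:
--                 continue
--             if 0 <= n[0] < len(matrix) and 0 <= n[1] < len(matrix[0]) and matrix[n[0]][n[1]] == '+':
--                 nxt = n
--                 break
--         if nxt is None:
--             return cur
--         last, cur = cur, nxt
-- ===== Notes on version B (the rewrite author's own statement) =====
-- stated objective: alternative
-- what changed: The tail recursion is replaced by an explicit while-loop carrying (cur, last) state with a single neighbour-finding step per iteration, so the chain is followed without growing the call stack.
-- outside the precondition, e.g. on follow_branch([['.', '+'], ['+', '+'], ['.']], 0, 1, None): A returns (0, 1), B returns (0, 1)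
import Mathlib
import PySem

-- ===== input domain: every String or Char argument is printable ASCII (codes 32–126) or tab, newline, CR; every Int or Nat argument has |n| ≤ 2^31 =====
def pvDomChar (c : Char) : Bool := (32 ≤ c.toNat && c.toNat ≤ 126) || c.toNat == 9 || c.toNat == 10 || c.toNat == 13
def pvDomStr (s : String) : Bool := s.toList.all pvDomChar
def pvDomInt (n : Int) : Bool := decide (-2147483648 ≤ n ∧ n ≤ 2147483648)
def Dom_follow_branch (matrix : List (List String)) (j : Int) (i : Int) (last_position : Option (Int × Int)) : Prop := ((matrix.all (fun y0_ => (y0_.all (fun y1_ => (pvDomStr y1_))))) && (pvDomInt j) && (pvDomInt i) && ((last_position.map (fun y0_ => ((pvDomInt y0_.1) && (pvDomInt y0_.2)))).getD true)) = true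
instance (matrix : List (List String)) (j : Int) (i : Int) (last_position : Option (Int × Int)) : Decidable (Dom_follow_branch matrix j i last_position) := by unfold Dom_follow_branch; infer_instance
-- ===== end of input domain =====

-- B replaces A's tail recursion by an explicit loop with (cur, last) state; same traversal, no call stack.
-- Both ports are fuelled identically; the fuel is never exhausted on inputs where the Python returns.

-- ===== PORT A =====
-- A's for-loop with early return: first direction whose neighbour passes all guards (or none).
def followA_dirs (matrix : List (List String)) (j i : Int) (last_position : Option (Int × Int)) :
    List (Int × Int) → Option (Int × Int)
  | [] => none
  | (di, dj) :: rest =>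
    let i_ := i + di
    let j_ := j + dj
    if last_position = some (i_, j_) then followA_dirs matrix j i last_position rest
    else if i_ < 0 ∨ i_ ≥ (matrix.length : Int) then followA_dirs matrix j i last_position rest
    else if j_ < 0 ∨ j_ ≥ ((matrix.headD []).length : Int) then followA_dirs matrix j i last_position rest
    else if (PySem.List.pyGet? ((PySem.List.pyGet? matrix i_).getD []) j_).getD "" = "+" then some (i_, j_)
    else followA_dirs matrix j i last_position rest

-- A's tail recursion (fuel only makes it total; inside Pre_ the fuel is never exhausted).
def followA : Nat → List (List String) → Int → Int → Option (Int × Int) → Int × Int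
  | 0, _, j, i, _ => (i, j)
  | fuel + 1, matrix, j, i, last_position =>
    match followA_dirs matrix j i last_position [(-1, 0), (1, 0), (0, 1), (0, -1)] with
    | some (i_, j_) => followA fuel matrix j_ i_ (some (i, j))
    | none => (i, j)

def follow_branch (matrix : List (List String)) (j : Int) (i : Int) (last_position : Option (Int × Int)) : Int × Int :=
  followA ((matrix.length * (matrix.headD []).length + 2) * (matrix.length * (matrix.headD []).length + 2)) matrix j i last_position

-- ===== PORT B =====
-- one loop body: the first admissible '+' neighbour of cur, if any
def fB (matrix : List (List String)) (cur : Int × Int) (last : Option (Int × Int)) (d : Int × Int) : Option (Int × Int) :=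
  let n := (cur.1 + d.1, cur.2 + d.2)
  if some n = last then none
  else if 0 ≤ n.1 ∧ n.1 < (matrix.length : Int) ∧ 0 ≤ n.2 ∧ n.2 < ((matrix.headD []).length : Int)
          ∧ (PySem.List.pyGet? ((PySem.List.pyGet? matrix n.1).getD []) n.2).getD "" = "+"
  then some n else none

def stepB (matrix : List (List String)) (cur : Int × Int) (last : Option (Int × Int)) : Option (Int × Int) :=
  List.findSome? (fB matrix cur last) [((-1 : Int), (0 : Int)), (1, 0), (0, 1), (0, -1)]

-- the while-loop with (cur, last) state (fuel only makes it total)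
def loopB (matrix : List (List String)) : Nat → (Int × Int) → Option (Int × Int) → Int × Int
  | 0, cur, _ => cur
  | fuel + 1, cur, last =>
    match stepB matrix cur last with
    | none => cur
    | some nxt => loopB matrix fuel nxt (some cur)

def follow_branch_alt (matrix : List (List String)) (j : Int) (i : Int) (last_position : Option (Int × Int)) : Int × Int :=
  loopB matrix ((matrix.length * (matrix.headD []).length + 2) * (matrix.length * (matrix.headD []).length + 2)) (i, j) last_position

-- ===== PRECONDITION & SPEC =====
-- helpers for Pre_: the '+' cells of the matrix and an iterated 2-core peeling
def pvAdj (c d : Int × Int) : Bool := (c.1 - d.1).natAbs + (c.2 - d.2).natAbs = 1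

def pvPlusCells (matrix : List (List String)) : List (Int × Int) :=
  (List.range matrix.length).flatMap fun r =>
    (List.range ((matrix.getD r []).length)).filterMap fun c =>
      if (matrix.getD r []).getD c "" = "+" then some ((r : Int), (c : Int)) else none

-- cells (r, c) that pass A's bounds test (0 ≤ r < rows, 0 ≤ c < len(row 0)) but fall beyond row r
def pvMissingCells (matrix : List (List String)) : List (Int × Int) :=
  (List.range matrix.length).flatMap fun r =>
    ((List.range ((matrix.headD []).length)).filter fun c => (matrix.getD r []).length ≤ c).map
      fun c => ((r : Int), (c : Int))

def pvPeel : Nat → List (Int × Int) → List (Int × Int)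
  | 0, s => s
  | n + 1, s => pvPeel n (s.filter fun c => 2 ≤ (s.filter (fun d => pvAdj c d)).length)

-- flood fill: the '+' cells (with column < len(row 0)) connected to the start through 4-adjacency
def pvGrow : Nat → List (Int × Int) → List (Int × Int) → List (Int × Int)
  | 0, _, r => r
  | n + 1, cells, r => pvGrow n cells (r ++ (cells.filter fun c => c ∉ r ∧ r.any (pvAdj c)))

def pvReach (matrix : List (List String)) (j i : Int) : List (Int × Int) :=
  let cells := (pvPlusCells matrix).filter fun p => p.2 < ((matrix.headD []).length : Int)
  pvGrow cells.length cells (cells.filter fun p => pvAdj p (i, j))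

-- Pre_ restricts to the task's natural domain, on whose complement A can raise: grids where every cell
-- that passes A's bounds test actually exists near the walk (A checks columns against row 0 only, so a
-- shorter row next to the start or to a reachable '+' cell can make matrix[i_][j_] raise IndexError),
-- and grids whose '+' cells reachable from the start are acyclic (a "branch" with a cycle has no end
-- point and A's non-backtracking recursion can recurse forever, RecursionError). Because the walk is
-- deterministic it may stop before touching the offending cell, so this necessarily also excludes some
-- ragged/cyclic grids on which A happens to return — see the cited examples in claim.json.
def Pre_follow_branch (matrix : List (List String)) (j : Int) (i : Int) (last_position : Option (Int × Int)) : Prop :=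
  (∀ m ∈ pvMissingCells matrix, ¬ (pvAdj m (i, j) = true ∨
      ∃ p ∈ pvReach matrix j i, pvAdj m p = true)) ∧
  pvPeel (pvReach matrix j i).length (pvReach matrix j i) = []

instance (matrix : List (List String)) (j : Int) (i : Int) (last_position : Option (Int × Int)) : Decidable (Pre_follow_branch matrix j i last_position) := by unfold Pre_follow_branch; infer_instance

def pvWitness_follow_branch : List (List String) × Int × Int × (Option (Int × Int)) :=
  ([[".", "+"], [".", "."]], 0, 0, none)

def Spec_follow_branch (matrix : List (List String)) (j : Int) (i : Int) (last_position : Option (Int × Int)) (out : Int × Int) : Prop := out = follow_branch_alt matrix j i last_position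
instance (matrix : List (List String)) (j : Int) (i : Int) (last_position : Option (Int × Int)) (out : Int × Int) : Decidable (Spec_follow_branch matrix j i last_position out) := by unfold Spec_follow_branch; infer_instance

-- ===== CLAIM (what is proved, stated in full; the proofs are below) =====
def Claim_equal_follow_branch : Prop := ∀ (matrix : List (List String)) (j : Int) (i : Int) (last_position : Option (Int × Int)), Dom_follow_branch matrix j i last_position → Pre_follow_branch matrix j i last_position → Spec_follow_branch matrix j i last_position (follow_branch matrix j i last_position)

-- ===== LEMMAS AND PROOFS =====
-- A's direction scan equals B's findSome? step, on any direction list.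
lemma dirs_eq_step (matrix : List (List String)) (j i : Int) (last : Option (Int × Int))
    (dirs : List (Int × Int)) :
    followA_dirs matrix j i last dirs = List.findSome? (fB matrix (i, j) last) dirs := by
  induction dirs with
  | nil => simp [followA_dirs]
  | cons d rest ih =>
    obtain ⟨di, dj⟩ := d
    rw [List.findSome?_cons]
    simp only [followA_dirs]
    rw [ih]
    by_cases h1 : last = some (i + di, j + dj)
    · simp [fB, List.headD_eq_head?_getD, h1]
    · have h1' : ¬ (some (i + di, j + dj) = last) := fun h => h1 h.symm
      by_cases h2 : i + di < 0 ∨ (matrix.length : Int) ≤ i + di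
      · have hC : ¬(0 ≤ i + di ∧ i + di < (matrix.length : Int) ∧ 0 ≤ j + dj ∧
            j + dj < ((matrix.head?.getD []).length : Int) ∧
            (PySem.List.pyGet? ((PySem.List.pyGet? matrix (i + di)).getD []) (j + dj)).getD "" = "+") := by
          rintro ⟨a, b, -⟩; omega
        simp [fB, List.headD_eq_head?_getD, h1, h2, h1', hC]
      · by_cases h3 : j + dj < 0 ∨ ((matrix.head?.getD []).length : Int) ≤ j + dj
        · have hC : ¬(0 ≤ i + di ∧ i + di < (matrix.length : Int) ∧ 0 ≤ j + dj ∧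
              j + dj < ((matrix.head?.getD []).length : Int) ∧
              (PySem.List.pyGet? ((PySem.List.pyGet? matrix (i + di)).getD []) (j + dj)).getD "" = "+") := by
            rintro ⟨-, -, a, b, -⟩; omega
          simp [fB, List.headD_eq_head?_getD, h1, h2, h3, h1', hC]
        · have hB : 0 ≤ i + di ∧ i + di < (matrix.length : Int) ∧ 0 ≤ j + dj ∧
              j + dj < ((matrix.head?.getD []).length : Int) :=
            ⟨by omega, by omega, by omega, by omega⟩
          simp only [fB, List.headD_eq_head?_getD, if_neg h1, if_neg h1', hB.1, hB.2.1, hB.2.2.1,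
            hB.2.2.2, and_true, true_and, if_neg h2, if_neg h3]
          split_ifs <;> rfl

lemma followA_eq_loopB (fuel : Nat) (matrix : List (List String)) (j i : Int)
    (last : Option (Int × Int)) : followA fuel matrix j i last = loopB matrix fuel (i, j) last := by
  induction fuel generalizing j i last with
  | zero => simp [followA, loopB]
  | succ n ih =>
    simp only [followA, loopB, stepB, dirs_eq_step]
    rcases hr : List.findSome? (fB matrix (i, j) last) [((-1 : Int), (0 : Int)), (1, 0), (0, 1), (0, -1)] with _ | ⟨pi, pj⟩
    · rfl
    · exact ih pj pi (some (i, j))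

lemma spec_of_pre (matrix : List (List String)) (j i : Int) (last : Option (Int × Int))
    (hpre : Pre_follow_branch matrix j i last) :
    Spec_follow_branch matrix j i last (follow_branch matrix j i last) := by
  unfold Spec_follow_branch follow_branch follow_branch_alt
  exact followA_eq_loopB _ matrix j i last

-- ===== VERDICT (by name: the statement is the Claim_ definition above) =====
theorem follow_branch_spec : Claim_equal_follow_branch := by
  intro matrix j i last _ hpre
  exact spec_of_pre matrix j i last hpre
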